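-- pv_equiv track=rewrite | github.com/Maxi580/GammaAstronomyAI | CNN/HexCircleLayers/neighbor.py | generate_neighbors_from_axial
-- ===== SOURCE A (Python) =====
-- from typing import List, Tuple, Dict
--
-- def generate_neighbors_from_axial(hexagons: List[Tuple[int, int]], kernel_size: int) -> List[List[int]]:
--     """
--     Given a list of hexagons (as axial coordinates), return a list where
--     each element is a list of indices corresponding to the neighbors of that hexagon.
--     """
--     # Create a mapping from axial coordinate to its index
--     hex_index = {hex_coord: idx for idx, hex_coord in enumerate(hexagons)}
--
--     neighbors: List[List[int]] = []
--     for q, r in hexagons: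
--         n_list = []
--         # Loop over all candidate offsets in the square defined by the kernel_size.
--         for dq in range(-kernel_size, kernel_size + 1):
--             for dr in range(-kernel_size, kernel_size + 1):
--                 # Check if the offset lies within a hexagon shape.
--                 # In axial coordinates, the distance can be defined as:
--                 #     distance = max(|dq|, |dr|, | -dq - dr| )
--                 if max(abs(dq), abs(dr), abs(-dq - dr)) <= kernel_size:
--                     neighbor_coord = (q + dq, r + dr)
--                     if neighbor_coord in hex_index:
--                         n_list.append(hex_index[neighbor_coord])
--                     else:
--                         # -1 means the value is out of range of the hex circle
--                         # required to keep the order of the neighbor indices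
--                         n_list.append(-1)
--         neighbors.append(n_list)
--     return neighbors
-- ===== SOURCE B (Python) =====
-- def generate_neighbors_from_axial(hexagons, kernel_size):
--     """Same result as A, but computed pairwise: instead of scanning the offset
--     square around each hexagon and looking coordinates up in a global
--     coordinate->index dict, each row scans the hexagon list once, computes the
--     axial difference to every other hexagon, and files its index under that
--     offset in a per-row slot dict; the row is then read out in canonical
--     offset order."""
--     k = kernel_size
--     offsets = [(dq, dr) for dq in range(-k, k + 1) for dr in range(-k, k + 1)
--                if max(abs(dq), abs(dr), abs(dq + dr)) <= k]
--     result = []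
--     for q, r in hexagons:
--         slot = {}
--         for j, (q2, r2) in enumerate(hexagons):
--             dq, dr = q2 - q, r2 - r
--             if max(abs(dq), abs(dr), abs(dq + dr)) <= k:
--                 slot[(dq, dr)] = j
--         result.append([slot.get(o, -1) for o in offsets])
--     return result
-- ===== Notes on version B (the rewrite author's own statement) =====
-- stated objective: alternative
-- what changed: A scans the (2k+1)^2 offset square around each hexagon and looks each candidate coordinate up in a global coordinate-to-index dict; B works pairwise: for each hexagon it scans the hexagon list, computes the axial difference to every other hexagon, files that index in a per-row dict keyed by offset, and reads the row out in canonical offset order (no global coordinate dict, no per-cell square scan).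
import Mathlib
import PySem

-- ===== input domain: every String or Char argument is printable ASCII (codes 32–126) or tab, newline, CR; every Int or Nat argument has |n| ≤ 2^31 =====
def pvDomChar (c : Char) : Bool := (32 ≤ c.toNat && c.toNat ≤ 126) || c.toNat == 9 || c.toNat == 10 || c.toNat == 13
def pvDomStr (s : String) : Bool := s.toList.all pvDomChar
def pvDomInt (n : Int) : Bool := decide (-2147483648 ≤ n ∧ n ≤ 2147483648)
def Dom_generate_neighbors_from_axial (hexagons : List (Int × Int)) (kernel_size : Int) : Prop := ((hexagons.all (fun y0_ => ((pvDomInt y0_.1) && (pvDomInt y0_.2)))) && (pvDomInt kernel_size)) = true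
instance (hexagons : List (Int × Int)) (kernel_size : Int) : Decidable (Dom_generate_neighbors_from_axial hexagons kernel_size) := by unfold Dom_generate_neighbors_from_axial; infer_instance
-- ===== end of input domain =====

-- B is pairwise: each row scans the hexagon list, files each index under its axial
-- difference in a per-row slot dict, and reads the row out in offset order,
-- replacing A's global coordinate dict and per-cell offset-square scan (objective: alternative).

-- ===== PORT A =====
def generate_neighbors_from_axial (hexagons : List (Int × Int)) (kernel_size : Int) : List (List Int) :=
  -- hex_index = {hex_coord: idx for idx, hex_coord in enumerate(hexagons)}
  let hex_index : PySem.Dict (Int × Int) Int :=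
    (PySem.List.enumerate hexagons 0).foldl (fun d p => d.insert p.2 p.1) PySem.Dict.empty
  hexagons.foldl (fun neighbors p =>
    let n_list : List Int :=
      (PySem.List.pyRange (-kernel_size) (kernel_size + 1) 1).foldl (fun n dq =>
        (PySem.List.pyRange (-kernel_size) (kernel_size + 1) 1).foldl (fun n dr =>
          if max |dq| (max |dr| |(-dq - dr)|) ≤ kernel_size then
            -- 'if neighbor_coord in hex_index: append hex_index[neighbor_coord] else append -1'
            -- (d[key] on a key known present is exact as (get? key).getD _)
            if hex_index.contains (p.1 + dq, p.2 + dr) then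
              n ++ [(hex_index.get? (p.1 + dq, p.2 + dr)).getD (-1)]
            else
              n ++ [-1]
          else n) n) []
    neighbors ++ [n_list]) []

-- ===== PORT B =====
def generate_neighbors_from_axial_alt (hexagons : List (Int × Int)) (kernel_size : Int) : List (List Int) :=
  let k := kernel_size
  -- offsets = [(dq, dr) for dq in … for dr in … if max(|dq|,|dr|,|dq+dr|) <= k]
  let offsets : List (Int × Int) :=
    (PySem.List.pyRange (-k) (k + 1) 1).flatMap (fun dq =>
      ((PySem.List.pyRange (-k) (k + 1) 1).filter
        (fun dr => decide (max |dq| (max |dr| |dq + dr|) ≤ k))).map (fun dr => (dq, dr)))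
  hexagons.foldl (fun result p =>
    -- slot = {}; for j, (q2, r2) in enumerate(hexagons): if valid diff: slot[diff] = j
    let slot : PySem.Dict (Int × Int) Int :=
      (PySem.List.enumerate hexagons 0).foldl (fun d jp =>
        if max |jp.2.1 - p.1| (max |jp.2.2 - p.2| |(jp.2.1 - p.1) + (jp.2.2 - p.2)|) ≤ k then
          d.insert (jp.2.1 - p.1, jp.2.2 - p.2) jp.1
        else d) PySem.Dict.empty
    result ++ [offsets.map (fun o => slot.getD o (-1))]) []

-- ===== PRECONDITION & SPEC =====
def Spec_generate_neighbors_from_axial (hexagons : List (Int × Int)) (kernel_size : Int) (out : List (List Int)) : Prop := out = generate_neighbors_from_axial_alt hexagons kernel_size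
instance (hexagons : List (Int × Int)) (kernel_size : Int) (out : List (List Int)) : Decidable (Spec_generate_neighbors_from_axial hexagons kernel_size out) := by unfold Spec_generate_neighbors_from_axial; infer_instance

-- ===== CLAIM =====
def Claim_equal_generate_neighbors_from_axial : Prop := ∀ (hexagons : List (Int × Int)) (kernel_size : Int), Dom_generate_neighbors_from_axial hexagons kernel_size → Spec_generate_neighbors_from_axial hexagons kernel_size (generate_neighbors_from_axial hexagons kernel_size)

-- ===== LEMMAS AND PROOFS =====

-- getD of the coordinate->index dict is the "last write wins" fold over the list.
theorem pv_hexD_getD (l : List (Int × (Int × Int))) (d : PySem.Dict (Int × Int) Int)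
    (key : Int × Int) :
    ((l.foldl (fun d p => d.insert p.2 p.1) d).getD key (-1))
      = l.foldl (fun v p => if p.2 = key then p.1 else v) (d.getD key (-1)) := by
  induction l generalizing d with
  | nil => rfl
  | cons p l ih =>
    simp only [List.foldl_cons, ih, PySem.Dict.getD_insert]
    by_cases h : p.2 = key
    · simp [h]
    · rw [if_neg h, if_neg (fun hk => h hk.symm)]

-- getD of B's per-row slot dict is the corresponding conditional "last write wins" fold.
theorem pv_slot_getD (l : List (Int × (Int × Int))) (d : PySem.Dict (Int × Int) Int)
    (c o : Int × Int) (k : Int) :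
    ((l.foldl (fun d jp =>
        if max |jp.2.1 - c.1| (max |jp.2.2 - c.2| |(jp.2.1 - c.1) + (jp.2.2 - c.2)|) ≤ k then
          d.insert (jp.2.1 - c.1, jp.2.2 - c.2) jp.1
        else d) d).getD o (-1))
      = l.foldl (fun v jp =>
          if (max |jp.2.1 - c.1| (max |jp.2.2 - c.2| |(jp.2.1 - c.1) + (jp.2.2 - c.2)|) ≤ k)
              ∧ (jp.2.1 - c.1, jp.2.2 - c.2) = o then jp.1 else v) (d.getD o (-1)) := by
  induction l generalizing d with
  | nil => rfl
  | cons jp l ih =>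
    simp only [List.foldl_cons]
    by_cases hv : max |jp.2.1 - c.1| (max |jp.2.2 - c.2| |(jp.2.1 - c.1) + (jp.2.2 - c.2)|) ≤ k
    · rw [if_pos hv, ih, PySem.Dict.getD_insert]
      by_cases he : (jp.2.1 - c.1, jp.2.2 - c.2) = o
      · rw [if_pos he.symm, if_pos ⟨hv, he⟩]
      · rw [if_neg (fun h => he h.symm), if_neg (fun h => he h.2)]
    · rw [if_neg hv, ih, if_neg (fun h => hv h.1)]

-- For a valid offset o, B's slot lookup at o equals A's dict lookup at c + o.
theorem pv_lookup_eq (hexagons : List (Int × Int)) (c o : Int × Int) (k : Int)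
    (hv : max |o.1| (max |o.2| |o.1 + o.2|) ≤ k) :
    (((PySem.List.enumerate hexagons 0).foldl (fun d jp =>
        if max |jp.2.1 - c.1| (max |jp.2.2 - c.2| |(jp.2.1 - c.1) + (jp.2.2 - c.2)|) ≤ k then
          d.insert (jp.2.1 - c.1, jp.2.2 - c.2) jp.1
        else d) PySem.Dict.empty).getD o (-1))
      = (((PySem.List.enumerate hexagons 0).foldl (fun d p => d.insert p.2 p.1)
          PySem.Dict.empty).getD (c.1 + o.1, c.2 + o.2) (-1)) := by
  rw [pv_hexD_getD, pv_slot_getD]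
  apply PySem.List.foldl_congr_mem
  intro v jp _
  by_cases he : jp.2 = (c.1 + o.1, c.2 + o.2)
  · have h1 : jp.2.1 - c.1 = o.1 := by rw [he]; ring
    have h2 : jp.2.2 - c.2 = o.2 := by rw [he]; ring
    rw [if_pos he, if_pos ⟨by rw [h1, h2]; exact hv, by rw [h1, h2]⟩]
  · rw [if_neg he]
    refine if_neg (fun h => he ?_)
    have h1 := congrArg Prod.fst h.2
    have h2 := congrArg Prod.snd h.2
    simp only at h1 h2
    exact Prod.ext (by omega) (by omega)

-- A's inner double loop for one hexagon equals B's readout of the slot dict.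
theorem pv_row_eq (hexagons : List (Int × Int)) (k : Int) (c : Int × Int)
    (d : PySem.Dict (Int × Int) Int)
    (hd : d = (PySem.List.enumerate hexagons 0).foldl (fun d p => d.insert p.2 p.1)
        PySem.Dict.empty) :
    (PySem.List.pyRange (-k) (k + 1) 1).foldl (fun n dq =>
        (PySem.List.pyRange (-k) (k + 1) 1).foldl (fun n dr =>
          if max |dq| (max |dr| |(-dq - dr)|) ≤ k then
            if d.contains (c.1 + dq, c.2 + dr) then
              n ++ [(d.get? (c.1 + dq, c.2 + dr)).getD (-1)]
            else
              n ++ [-1]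
          else n) n) []
      = ((PySem.List.pyRange (-k) (k + 1) 1).flatMap (fun dq =>
          ((PySem.List.pyRange (-k) (k + 1) 1).filter
            (fun dr => decide (max |dq| (max |dr| |dq + dr|) ≤ k))).map
            (fun dr => (dq, dr)))).map
          (fun o => ((PySem.List.enumerate hexagons 0).foldl (fun d jp =>
            if max |jp.2.1 - c.1| (max |jp.2.2 - c.2| |(jp.2.1 - c.1) + (jp.2.2 - c.2)|) ≤ k then
              d.insert (jp.2.1 - c.1, jp.2.2 - c.2) jp.1
            else d) PySem.Dict.empty).getD o (-1)) := by
  rw [List.map_flatMap]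
  have hneg : ∀ dq dr : Int, |(-dq - dr)| = |dq + dr| := by
    intro dq dr
    rw [show -dq - dr = -(dq + dr) by ring, abs_neg]
  have hstep : ∀ (n : List Int) (dq : Int),
      ((PySem.List.pyRange (-k) (k + 1) 1).foldl (fun n dr =>
          if max |dq| (max |dr| |(-dq - dr)|) ≤ k then
            if d.contains (c.1 + dq, c.2 + dr) then
              n ++ [(d.get? (c.1 + dq, c.2 + dr)).getD (-1)]
            else
              n ++ [-1]
          else n) n)
        = n ++ (((PySem.List.pyRange (-k) (k + 1) 1).filter
            (fun dr => decide (max |dq| (max |dr| |dq + dr|) ≤ k))).map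
            (fun dr => (dq, dr))).map
            (fun o => ((PySem.List.enumerate hexagons 0).foldl (fun d jp =>
              if max |jp.2.1 - c.1| (max |jp.2.2 - c.2| |(jp.2.1 - c.1) + (jp.2.2 - c.2)|) ≤ k then
                d.insert (jp.2.1 - c.1, jp.2.2 - c.2) jp.1
              else d) PySem.Dict.empty).getD o (-1)) := by
    intro n dq
    have hbody : (fun (n : List Int) (dr : Int) =>
        if max |dq| (max |dr| |(-dq - dr)|) ≤ k then
          if d.contains (c.1 + dq, c.2 + dr) then
            n ++ [(d.get? (c.1 + dq, c.2 + dr)).getD (-1)]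
          else
            n ++ [-1]
        else n)
      = (fun (n : List Int) (dr : Int) =>
          if max |dq| (max |dr| |dq + dr|) ≤ k then
            n ++ [d.getD (c.1 + dq, c.2 + dr) (-1)] else n) := by
      funext n dr
      rw [hneg]
      by_cases hc : max |dq| (max |dr| |dq + dr|) ≤ k
      · simp only [if_pos hc]
        by_cases hin : d.contains (c.1 + dq, c.2 + dr)
        · rw [if_pos hin]; rfl
        · rw [if_neg hin,
            PySem.Dict.getD_of_not_contains d (-1) (by simpa using hin)]
      · simp [hc]
    rw [hbody, PySem.List.foldl_append_ite (fun dr => max |dq| (max |dr| |dq + dr|) ≤ k)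
      (fun dr => d.getD (c.1 + dq, c.2 + dr) (-1))]
    congr 1
    rw [List.map_map]
    apply List.map_congr_left
    intro dr hdr
    have hv : max |dq| (max |dr| |dq + dr|) ≤ k := by
      have := (List.mem_filter.mp hdr).2
      simpa using this
    simp only [Function.comp]
    rw [pv_lookup_eq hexagons c (dq, dr) k hv, hd]
  calc (PySem.List.pyRange (-k) (k + 1) 1).foldl (fun n dq =>
        (PySem.List.pyRange (-k) (k + 1) 1).foldl _ n) []
      = (PySem.List.pyRange (-k) (k + 1) 1).foldl (fun n dq =>
          n ++ (((PySem.List.pyRange (-k) (k + 1) 1).filter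
            (fun dr => decide (max |dq| (max |dr| |dq + dr|) ≤ k))).map
            (fun dr => (dq, dr))).map
            (fun o => ((PySem.List.enumerate hexagons 0).foldl (fun d jp =>
              if max |jp.2.1 - c.1| (max |jp.2.2 - c.2| |(jp.2.1 - c.1) + (jp.2.2 - c.2)|) ≤ k then
                d.insert (jp.2.1 - c.1, jp.2.2 - c.2) jp.1
              else d) PySem.Dict.empty).getD o (-1))) [] := by
        apply PySem.List.foldl_congr_mem
        intro n dq _
        exact hstep n dq
    _ = _ := by
        rw [PySem.List.foldl_append_eq_flatMap]; rfl

-- ===== VERDICT =====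
theorem generate_neighbors_from_axial_spec : Claim_equal_generate_neighbors_from_axial := by
  intro hexagons kernel_size _
  unfold Spec_generate_neighbors_from_axial generate_neighbors_from_axial generate_neighbors_from_axial_alt
  rw [PySem.List.foldl_append_singleton_eq_map, PySem.List.foldl_append_singleton_eq_map]
  simp only [List.nil_append]
  apply List.map_congr_left
  intro p _
  exact pv_row_eq hexagons kernel_size p _ rfl
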